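/- GENERATED by mk_final_copies.py from the proof of the farm's unit `start_decoder.C2d` (farm:start_decoder.C2d.1: Proof.lean) as the
   re-elaboration sweep compiled it — do not edit. -/
import Asan.CheckWalk
import Vorbis.Spec.Units.start_decoder_C2d
import Vorbis.Spec.StartDecoderCarry
import Vorbis.Spec.StartDecoderC7

open X86 X86.User Asan Vorbis Vorbis.Spec Vorbis.Spec.StartDecoder

set_option maxRecDepth 100000
set_option maxHeartbeats 4000000

namespace Vorbis.Spec.start_decoder_C2d

/-- A window of segment C2d: the stack below the steady rsp (the pushed return addresses of the check call and of `error`, their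
frames), the pointer field at offset `o` of the struct `cb(i)` at `c` (`o = 8`: `codeword_lengths`), `f->eof` / `f->error`
`[f + 136, f + 144)`. -/
def C2dWin (g : Ghost) (c o : Nat) (w : Span) : Prop :=
  (g.R - 408 ≤ w.lo ∧ w.hi ≤ g.R) ∨ (c + o ≤ w.lo ∧ w.hi ≤ c + o + 8) ∨ (g.f + 136 ≤ w.lo ∧ w.hi ≤ g.f + 144)

/-- **THE INVARIANT SIDE OF A SEGMENT THAT STORES ONE POINTER FIELD OF THE STRUCT `cb(i)`** (C2d: `codeword_lengths`, offset 8; the same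
lemma serves C6b / C6c / C6d with offsets 40 / 8 / 40): from `Frame` and CUR(i) at `v` and a later state `s` whose memory differs from
`v.mem` only in windows `C2dWin` (no shadow byte): `Frame` at the new program counter, CUR(i), `cb(i)` unmoved, and the struct's bytes
before and after the field are kept (`Block.Kept`: every other field reads the same). -/
theorem c2d_carry {u₀ : State} {g : Ghost} {pc pc' : Word} {i : Nat} {A2 A3 Ai : Arena} {A : Arena × List Obj} {v s : State}
    {ws : List Span} (o : Nat) (ho : o + 8 ≤ 2120) (hfr : Frame u₀ g pc A v) (hcur : Cur g i A2 A3 Ai A v)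
    (hs : Mem.SameExcept ws v.mem s.mem) (hun : ShadowUntouched v.mem s.mem)
    (hok : ∀ w, w ∈ ws → C2dWin g (g.cb v.mem i) o w)
    (hrip : s.rip = pc') (hrsp : s.reg .rsp = v.reg .rsp) (hcode : CodeOK u₀ s.mem) (hinv : abiInv s)
    (hr14 : s.reg .r14 = v.reg .r14) :
    Frame u₀ g pc' A s ∧ Cur g i A2 A3 Ai A s ∧ g.cb s.mem i = g.cb v.mem i ∧
      (⟨g.cb v.mem i, o⟩ : Block).Kept v.mem s.mem ∧ (⟨g.cb v.mem i + o + 8, 2120 - o - 8⟩ : Block).Kept v.mem s.mem := by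
  have hpos : Pos g A := Pos.of hfr hcur
  have hm0 : MInv g i A2 A3 Ai A v.mem := MInv.of hfr hcur
  have hcw := hm0.c_where
  have p1 := hpos.r_eq
  have p2 := hpos.ra_lo
  have p3 := hpos.ra_hi
  have p4 := hpos.f_lo
  have p5 := hpos.f_hi
  have p6 := hpos.f_stack
  have p7 := hpos.objOut
  have p9 := hpos.ar_lo
  have p10 := hpos.ar_hi
  have p11 := hpos.ar_stack
  have hok0 : ∀ w, w ∈ ws → OkWin g Ai A (g.cb v.mem i) w := by
    intro w hw
    have k := hok w hw
    unfold C2dWin at k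
    left
    unfold OkWin0
    omega
  have hb : Bits (g.Blk A) g.len s.mem g.f := by
    apply bits_kept hpos hcur.sd.bits hs
    intro w hw
    have k := hok w hw
    unfold C2dWin at k
    omega
  have hfr' := Frame.step hfr hcur hs hun hok0 hb hrip hrsp hcode hinv
  obtain ⟨hcur', hcb⟩ := Cur.step hfr hcur hs hun hok0 hb hr14
  refine ⟨hfr', hcur', hcb, ?_, ?_⟩
  · apply Block.Kept.of_sameExcept hs _ (by simp only []; omega)
    intro w hw
    have k := hok w hw
    unfold C2dWin at k
    simp only []
    omega
  · apply Block.Kept.of_sameExcept hs _ (by simp only []; omega)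
    intro w hw
    have k := hok w hw
    unfold C2dWin at k
    simp only []
    omega

/-- **The fields of the book that the store `c->codeword_lengths = p` does not touch** read the same: K1 (`dimensions`, `entries`: the
bytes `[c, c + 8)`), `sparse` and the seven fields of `Fresh7` (bytes `[c + 16, c + 2120)`). -/
theorem c2d_fields {m m' : Mem} {c : Nat} (hlo : (⟨c, 8⟩ : Block).Kept m m')
    (hhi : (⟨c + 8 + 8, 2120 - 8 - 8⟩ : Block).Kept m m') (k1 : Codebook.K1 m c) (sp : Codebook.sparse m c = 0)
    (fr : Fresh7 m c) :
    Codebook.K1 m' c ∧ Codebook.sparse m' c = 0 ∧ Fresh7 m' c ∧ Codebook.entries m' c = Codebook.entries m c := by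
  have e_dim : Codebook.dimensions m' c = Codebook.dimensions m c := by
    simp only [vacc, voff]
    exact hlo.i32 _ (by simp only []; omega) (by simp only []; omega)
  have e_ent : Codebook.entries m' c = Codebook.entries m c := by
    simp only [vacc, voff]
    exact hlo.i32 _ (by simp only []; omega) (by simp only []; omega)
  have e_sp : Codebook.sparse m' c = Codebook.sparse m c := by
    simp only [vacc, voff]
    exact hhi.u8 _ (by simp only []; omega) (by simp only []; omega)
  have e_lt : Codebook.lookup_type m' c = Codebook.lookup_type m c := by
    simp only [vacc, voff]
    exact hhi.u8 _ (by simp only []; omega) (by simp only []; omega)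
  have e_lv : Codebook.lookup_values m' c = Codebook.lookup_values m c := by
    simp only [vacc, voff]
    exact hhi.u32 _ (by simp only []; omega) (by simp only []; omega)
  have e_mu : Codebook.multiplicands m' c = Codebook.multiplicands m c := by
    simp only [vacc, voff]
    exact hhi.u64 _ (by simp only []; omega) (by simp only []; omega)
  have e_cw : Codebook.codewords m' c = Codebook.codewords m c := by
    simp only [vacc, voff]
    exact hhi.u64 _ (by simp only []; omega) (by simp only []; omega)
  have e_sc : Codebook.sorted_codewords m' c = Codebook.sorted_codewords m c := by
    simp only [vacc, voff]
    exact hhi.u64 _ (by simp only []; omega) (by simp only []; omega)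
  have e_sv : Codebook.sorted_values m' c = Codebook.sorted_values m c := by
    simp only [vacc, voff]
    exact hhi.u64 _ (by simp only []; omega) (by simp only []; omega)
  have e_se : Codebook.sorted_entries m' c = Codebook.sorted_entries m c := by
    simp only [vacc, voff]
    exact hhi.i32 _ (by simp only []; omega) (by simp only []; omega)
  refine ⟨⟨?_, ?_, ?_, ?_⟩, ?_, ?_, e_ent⟩
  · rw [e_dim]
    exact k1.dim_pos
  · rw [e_dim]
    exact k1.dim_le
  · rw [e_ent]
    exact k1.ent_nonneg
  · rw [e_ent]
    exact k1.ent_lt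
  · rw [e_sp]
    exact sp
  · exact
      { lookup_type := by rw [e_lt]; exact fr.lookup_type
        lookup_values := by rw [e_lv]; exact fr.lookup_values
        multiplicands := by rw [e_mu]; exact fr.multiplicands
        sorted_codewords := by rw [e_sc]; exact fr.sorted_codewords
        sorted_values := by rw [e_sv]; exact fr.sorted_values
        codewords := by rw [e_cw]; exact fr.codewords
        sorted_entries := by rw [e_se]; exact fr.sorted_entries }

/-- Segment C2d: from the return of `setup_malloc(f, entries)` (0x1144c2, `AtC2d`): the checked store `c->codeword_lengths = rax` (`C7.cb_site`;
the invariant side is `c2d_carry` + `c2d_fields`), then NULL → the outofmem stub (`error`, `AtERR` by `Cur.failed` on the carried CUR(i)),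
`ordered ≠ 0` → `AtC3`, else `AtC4` with `j = 0` (`place` = the dense clauses of `LengthsAt`, the block from `InC2d.res`). -/
theorem c2d_walk : Vorbis.Spec.start_decoder_C2d.Statement := by
  intro Lay hLay μ hμ u₀ hcode h_error hst8
  intro g i v hat
  obtain ⟨A, A2, A3, Ai, h⟩ := hat
  have hfr := h.frame
  have hhand := h.cur.hand
  have he := hfr.entry
  v_entry he
  simp only [depth] at he_room he_stack
  have w_rip := hfr.rip
  have w_rsp := hfr.rsp
  have w_eq : Mem.EqOn Vorbis.L.textLo Vorbis.L.textHi u₀.mem v.mem := hfr.code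
  have hdf : v.flags .df = false := (show abiInv _ from hfr.inv).1
  have hmx : v.mxcsr &&& 0x1F80 = 0x1F80 := (show abiInv _ from hfr.inv).2
  have hsse := Vorbis.sseOK_of_abiInv hfr.inv
  obtain ⟨hR1, hR2⟩ := hfr.r_eq
  have eR : g.R = (g.e.reg .rsp).toNat - 1480 := rfl
  have eRA : g.RA = (g.e.reg .rsp).toNat := rfl
  have c_rsp : v.reg .rsp = g.e.reg .rsp - 1480 := by
    rw [w_rsp, eR, ← Vorbis.addr_sub_lit _ 1480 (by show (1480 : Nat) ≤ _; omega), Vorbis.addr_toNat]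
  clear w_rsp
  have k_rsp := c_rsp
  have r_f : v.mem.readLE (g.e.reg .rsp - 1456) 8 = g.f := by
    have e : g.e.reg .rsp - 1456 = addr (g.R + 0x18) := by
      have e1 : g.R + 0x18 = (g.e.reg .rsp).toNat - 1456 := by
        show (g.e.reg .rsp).toNat - 1480 + 0x18 = _
        omega
      rw [e1, ← Vorbis.addr_sub_lit _ 1456 (by show (1456 : Nat) ≤ _; omega), Vorbis.addr_toNat]
    rw [e]
    exact h.cur.slot_f
  have hpos : Pos g A := Pos.of hfr h.cur
  have hm0 : MInv g i A2 A3 Ai A v.mem := MInv.of hfr h.cur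
  have hcw := hm0.c_where
  obtain ⟨c, hc⟩ : ∃ c, g.cb v.mem i = c := ⟨_, rfl⟩
  have c_r14 := h.cur.r14
  rw [hc] at c_r14 hcw
  have hcT : (addr c).toNat = c := Vorbis.toNat_addr _ (by omega)
  have hfT : (addr g.f).toNat = g.f := Vorbis.toNat_addr _ (by
    have := hpos.f_hi
    omega)
  have hsub : ∀ o, o ∈ stackObjs g.frames ++ A.2 → o ∈ stackObjs g.frames' ++ A.2 := by
    intro o ho
    unfold Ghost.frames'
    rw [stackObjs_cons]
    rcases List.mem_append.mp ho with hs | ho'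
    · exact List.mem_append_left _ (List.mem_append_right _ hs)
    · exact List.mem_append_right _ ho'
  have herr := h_error A.2 g.frames'
  have hText : 1154368 ≤ A.1.B := hhand.arenaText
  have t1 : (g.e.reg .rsp - 1488).toNat = (g.e.reg .rsp).toNat - 1488 := by u_omega
  have hfn : (UInt64.ofNat g.f).toNat = g.f := hfT
  u_walk hcode [hμ.vendor] until [pc_C4, pc_ERR, pc_C3] span [Vorbis.L.textLo, Vorbis.L.textHi] side (v_side)
  case check_1144c9 =>
    have hun : ShadowUntouched v.mem s_1144c9.mem := by v_untouched
    have hsite := C7.cb_site h.cur 8 8 (by omega) (by omega)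
    rw [hc] at hsite
    apply Vorbis.Spec.check_site hfr.shadow hun hsite
    u_omega
  case call_inv => v_inv
  case pre_1144e4 =>
    have hun : ShadowUntouched v.mem s_1144e4.mem := by v_untouched
    have hf' : (s_1144e4.reg .rdi).toNat = g.f := by
      rw [w_rdi]
      exact hfn
    have hrs : (s_1144e4.reg .rsp).toNat + 8 = g.R := by
      rw [w_rsp, t1]
      omega
    refine ⟨⟨?_, hfr.offText⟩, ?_⟩
    · rw [hrs]
      exact hfr.shadow.untouched hun
    · rw [hf']
      exact hhand.obj.mono hsub
  case cont =>
    -- `error(f, VORBIS_outofmem)` returned (after the store of the NULL): the `jmp` to the epilogue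
    have hsA : Mem.SameExcept [⟨g.R - 408, g.R⟩, ⟨c + 8, c + 16⟩] v.mem s_1144e4.mem := by u_same
    have hunA : ShadowUntouched v.mem s_1144e4.mem := by v_untouched
    rw [w_mem_1144e4] at hsA hunA
    v_after_call w_rsp_1144e4 w_mem_1144e4
    have hf : (s_1144e4.reg .rdi).toNat = g.f := by
      rw [w_rdi_1144e4]
      exact hfn
    simp only [hf, t1] at w_same
    have hp : s_1144e4r.reg .rax = 0 ∧ ShadowUntouched s_1144e4.mem s_1144e4r.mem ∧
        s_1144e4r.mem.readLE (s_1144e4.reg .rdi + 140) 4 = (s_1144e4.reg .rsi).toNat % 2 ^ 32 := w_post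
    have c_rax : s_1144e4r.reg .rax = 0 := hp.1
    have w_rax : s_1144e4r.reg .rax = 0 := hp.1
    have hun3 : ShadowUntouched s_1144e4.mem s_1144e4r.mem := hp.2.1
    rw [w_mem_1144e4] at hun3
    have hsB : Mem.SameExcept [⟨g.R - 408, g.R⟩, ⟨c + 8, c + 16⟩, ⟨g.f + 140, g.f + 144⟩] v.mem s_1144e4r.mem := by
      refine (C7.sameExcept_weaken hsA ?_).trans (w_same.mono ?_)
      · intro w hw
        simp only [List.mem_cons, List.mem_nil_iff, or_false] at hw ⊢
        rcases hw with rfl | rfl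
        · exact Or.inl rfl
        · exact Or.inr (Or.inl rfl)
      · intro w hw a h1 h2
        simp only [List.mem_cons, List.mem_nil_iff, or_false] at hw
        rcases hw with rfl | rfl
        · simp only [] at h1 h2
          exact ⟨_, List.mem_cons_self, by simp only []; omega, by simp only []; omega⟩
        · simp only [] at h1 h2
          exact ⟨_, List.mem_cons_of_mem _ (List.mem_cons_of_mem _ List.mem_cons_self), by simp only []; omega,
            by simp only []; omega⟩
    have hunB : ShadowUntouched v.mem s_1144e4r.mem := Mem.EqOn.trans hunA hun3
    have hokB : ∀ w, w ∈ [(⟨g.R - 408, g.R⟩ : Span), ⟨c + 8, c + 16⟩, ⟨g.f + 140, g.f + 144⟩] →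
        C2dWin g (g.cb v.mem i) 8 w := by
      intro w hw
      rw [hc]
      simp only [List.mem_cons, List.mem_nil_iff, or_false] at hw
      unfold C2dWin
      rcases hw with rfl | rfl | rfl <;> simp only [] <;> omega
    u_walk hcode [hμ.vendor] until [pc_C4, pc_ERR, pc_C3] span [Vorbis.L.textLo, Vorbis.L.textHi] side (v_side)
    have hsC : Mem.SameExcept [⟨g.R - 408, g.R⟩, ⟨c + 8, c + 16⟩, ⟨g.f + 140, g.f + 144⟩] v.mem s_1144e9.mem := by
      rw [w_mem]
      exact hsB
    have hunC : ShadowUntouched v.mem s_1144e9.mem := by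
      rw [w_mem]
      exact hunB
    have hinv' : abiInv s_1144e9 := by
      refine Vorbis.abiInv_of ?_ ?_
      · rw [w_flags]
        exact w_df
      · rw [w_mxcsr]
        exact w_mx
    have hrsp' : s_1144e9.reg .rsp = v.reg .rsp := by
      rw [w_rsp, c_rsp]
    obtain ⟨hfr', hcur', _, _, _⟩ := c2d_carry 8 (by omega) hfr h.cur hsC hunC hokB w_rip hrsp' w_eq hinv'
      (w_kept.get .r14 rfl)
    apply ReachVia.done
    refine Or.inr (Or.inr ⟨A, hfr', hhand, Or.inl ⟨?_, hcur'.failed⟩⟩)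
    rw [w_rax]
    rfl
  case cont =>
    -- `ordered ≠ 0`: the entry of C3
    have hne : ¬ v.reg .rax = 0 := by
      intro h0
      rw [h0] at hbr_1143fe
      exact hbr_1143fe rfl
    have hS : Since Ai A.1 ⟨(v.reg .rax).toNat, (Codebook.entries v.mem c).toNat⟩ := by
      rcases h.res with h0 | hS
      · exact absurd h0 hne
      · rw [hc] at hS
        exact hS
    have hsA : Mem.SameExcept [⟨g.R - 408, g.R⟩, ⟨c + 8, c + 16⟩] v.mem s_114407.mem := by u_same
    have hunA : ShadowUntouched v.mem s_114407.mem := by v_untouched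
    have hokA : ∀ w, w ∈ [(⟨g.R - 408, g.R⟩ : Span), ⟨c + 8, c + 16⟩] → C2dWin g (g.cb v.mem i) 8 w := by
      intro w hw
      rw [hc]
      simp only [List.mem_cons, List.mem_nil_iff, or_false] at hw
      unfold C2dWin
      rcases hw with rfl | rfl <;> simp only [] <;> omega
    have hrsp' : s_114407.reg .rsp = v.reg .rsp := by
      rw [w_rsp, c_rsp]
    obtain ⟨hfr', hcur', hcb, hlo, hhi⟩ := c2d_carry 8 (by omega) hfr h.cur hsA hunA hokA w_rip hrsp' w_eq (by v_inv)
      (w_kept.get .r14 rfl)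
    rw [hc] at hcb hlo hhi
    have hk1 := h.k1
    have hsp0 := h.sparse0
    have hfresh := h.fresh
    rw [hc] at hk1 hsp0 hfresh
    obtain ⟨k1', sp', fresh', e_ent⟩ := c2d_fields hlo hhi hk1 hsp0 hfresh
    have e_cl : Codebook.codeword_lengths s_114407.mem c = (v.reg .rax).toNat := by
      simp only [vacc, voff]
      unfold Mem.u64
      rw [← Vorbis.addr_add_lit, w_mem]
      u_read
    apply ReachVia.done
    refine Or.inl ⟨A, A2, A3, Ai, ?_⟩
    exact
      { frame := hfr'
        cur := hcur'
        k1 := by rw [hcb]; exact k1'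
        sparse0 := by rw [hcb]; exact sp'
        rbx := by rw [hcb, e_cl, w_rbx, Vorbis.addr_toNat]
        lengths := by rw [hcb, e_cl, e_ent]; exact hS
        noTemps := h.noTemps
        fresh := by rw [hcb]; exact fresh' }
  case cont =>
    -- `ordered = 0`: the head of loop 3786 with `j = 0`
    have hne : ¬ v.reg .rax = 0 := by
      intro h0
      rw [h0] at hbr_1143fe
      exact hbr_1143fe rfl
    have hS : Since Ai A.1 ⟨(v.reg .rax).toNat, (Codebook.entries v.mem c).toNat⟩ := by
      rcases h.res with h0 | hS
      · exact absurd h0 hne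
      · rw [hc] at hS
        exact hS
    have hsA : Mem.SameExcept [⟨g.R - 408, g.R⟩, ⟨c + 8, c + 16⟩] v.mem s_114410.mem := by u_same
    have hunA : ShadowUntouched v.mem s_114410.mem := by v_untouched
    have hokA : ∀ w, w ∈ [(⟨g.R - 408, g.R⟩ : Span), ⟨c + 8, c + 16⟩] → C2dWin g (g.cb v.mem i) 8 w := by
      intro w hw
      rw [hc]
      simp only [List.mem_cons, List.mem_nil_iff, or_false] at hw
      unfold C2dWin
      rcases hw with rfl | rfl <;> simp only [] <;> omega
    have hrsp' : s_114410.reg .rsp = v.reg .rsp := by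
      rw [w_rsp, c_rsp]
    obtain ⟨hfr', hcur', hcb, hlo, hhi⟩ := c2d_carry 8 (by omega) hfr h.cur hsA hunA hokA w_rip hrsp' w_eq (by v_inv)
      (w_kept.get .r14 rfl)
    rw [hc] at hcb hlo hhi
    have hk1 := h.k1
    have hsp0 := h.sparse0
    have hfresh := h.fresh
    rw [hc] at hk1 hsp0 hfresh
    obtain ⟨k1', sp', fresh', e_ent⟩ := c2d_fields hlo hhi hk1 hsp0 hfresh
    have e_cl : Codebook.codeword_lengths s_114410.mem c = (v.reg .rax).toNat := by
      simp only [vacc, voff]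
      unfold Mem.u64
      rw [← Vorbis.addr_add_lit, w_mem]
      u_read
    apply ReachVia.done
    have hr12 : v.reg .r12 = addr 0 := by
      have h2 := h.r12
      have h01 : (v.reg .r12).toNat = 0 ∨ (v.reg .r12).toNat = 1 := by omega
      rcases h01 with h0 | h1
      · exact eq_addr _ _ h0
      · have e1 : v.reg .r12 = addr 1 := eq_addr _ _ h1
        rw [e1] at hbr_114407
        exact absurd hbr_114407 (by decide)
    have hno : ¬ Codebook.sparse s_114410.mem c = 1 := by
      rw [sp']
      decide
    refine Or.inr (Or.inl ⟨A, (v.reg .rax).toNat, 0, A2, A3, Ai, ?_⟩)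
    exact
      { frame := hfr'
        cur := hcur'
        k1 := by rw [hcb]; exact k1'
        r12 := (w_kept.get .r12 rfl).trans hr12
        j_le := by rw [hcb]; exact k1'.ent_nonneg
        rbp := by rw [w_rbp, hr12]; rfl
        rbx := by rw [w_rbx, Vorbis.addr_toNat]
        lenL := fun j hj => absurd hj (Nat.not_lt_zero j)
        place := by
          rw [hcb]
          exact
            { sparse_01 := Or.inl sp'
              sparse_temp := fun h1 => absurd h1 hno
              sparse_null := fun h1 => absurd h1 hno
              dense_block := fun _ => by rw [e_ent]; exact hS
              dense_eq := fun _ => e_cl.symm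
              dense_temps := fun _ => h.noTemps }
        fresh := by rw [hcb]; exact fresh' }

end Vorbis.Spec.start_decoder_C2d

theorem Vorbis.Spec.Worked.start_decoder_C2d_ok : Vorbis.Spec.start_decoder_C2d.Statement := Vorbis.Spec.start_decoder_C2d.c2d_walk
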